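-- pv_equiv track=rewrite | github.com/luishrmc/PyCodes | PF/VPL3(Map,Filter,Reduce).py | mostCommonFirstChar
-- ===== SOURCE A (Python) =====
-- def firstChars(L):
--     return (list(map(lambda x: x[0],L)))
--
-- def incValue(D,N): #modo mais simples: D[N] = D[N] + 1 if N in D else 1 / return D
--     for key,value in D.items():                         #o "N in D" é o que ocasiona o loop
--         if key == N:
--             D[key] += 1
--             return D
--     D[N] = 1
--     return D
--
-- def countFirsts(L):
--     D = dict()
--     for i in firstChars(L):
--         D = incValue(D,i)
--     return D
--
-- def mostCommonFirstChar(L):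
--     a = 0
--     D = countFirsts(L)
--     for key,value in D.items():
--         if a < value:
--             a = value
--             b = key
--     return b
-- ===== SOURCE B (Python) =====
-- def mostCommonFirstChar(L):
--     chars = [x[0] for x in L]
--     best = 0
--     seen = []
--     for c in chars:
--         if c not in seen:
--             seen.append(c)
--             cnt = chars.count(c)
--             if best < cnt:
--                 best = cnt
--                 ans = c
--     return ans
-- ===== Notes on version B (the rewrite author's own statement) =====
-- stated objective: simpler
-- what changed: Replaces building a frequency dict via a linear-scan incValue helper and then scanning its items with a single pass over the first characters that keeps a 'seen' list and recounts each newly seen character on demand with chars.count (a C-level scan per distinct character instead of a Python-level dict-items scan per element), updating the answer on strict improvement.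
-- outside the precondition, e.g. on mostCommonFirstChar([]): A raises UnboundLocalError, B raises UnboundLocalError; on mostCommonFirstChar(['', 'a']): A raises IndexError, B raises IndexError
import Mathlib
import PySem

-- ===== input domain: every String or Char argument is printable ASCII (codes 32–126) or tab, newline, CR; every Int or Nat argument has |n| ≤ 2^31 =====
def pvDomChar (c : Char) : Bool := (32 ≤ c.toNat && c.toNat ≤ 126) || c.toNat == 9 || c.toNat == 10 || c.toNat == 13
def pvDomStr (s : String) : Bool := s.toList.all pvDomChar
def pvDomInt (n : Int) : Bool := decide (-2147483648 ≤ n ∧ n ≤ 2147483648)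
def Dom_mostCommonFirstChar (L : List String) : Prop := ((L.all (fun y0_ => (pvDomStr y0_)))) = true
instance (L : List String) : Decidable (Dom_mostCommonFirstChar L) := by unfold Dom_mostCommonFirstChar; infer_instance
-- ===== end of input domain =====

-- B replaces A's hand-rolled frequency dict (built key-scan by key-scan, then scanned for the max)
-- with one pass over the first characters that keeps a 'seen' list and recounts each newly seen
-- character on demand; objective: simpler.


-- ===== PORT A =====
-- x[0]: PySem.Str.pyGet? is none exactly where Python raises IndexError (excluded by Pre_);
-- the ' ' default is never reached inside Pre_.
def pvFirstChars (L : List String) : List Char :=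
  L.map (fun x => (PySem.Str.pyGet? x 0).getD ' ')

-- incValue's for-loop over D.items() with early return, as structural recursion on the item list
def pvIncValue (D : List (Char × Int)) (N : Char) : List (Char × Int) :=
  match D with
  | [] => [(N, 1)]
  | (k, v) :: rest => if k == N then (k, v + 1) :: rest else (k, v) :: pvIncValue rest N

def pvCountFirsts (L : List String) : List (Char × Int) :=
  (pvFirstChars L).foldl pvIncValue []

-- b is unassigned until the first 'a < value'; none = Python's UnboundLocalError (excluded by Pre_)
def mostCommonFirstChar (L : List String) : String :=
  let D := pvCountFirsts L
  let r := D.foldl (fun (s : Int × Option Char) (kv : Char × Int) =>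
    if s.1 < kv.2 then (kv.2, some kv.1) else s) (0, none)
  match r.2 with
  | some c => String.ofList [c]
  | none => ""

-- ===== PORT B =====
-- state = (best, ans, seen); ans none = Python's UnboundLocalError (excluded by Pre_)
def mostCommonFirstChar_alt (L : List String) : String :=
  let chars := L.map (fun x => (PySem.Str.pyGet? x 0).getD ' ')
  let r := chars.foldl (fun (s : Int × Option Char × List Char) (c : Char) =>
    if s.2.2.contains c then s
    else
      let cnt : Int := (PySem.List.count chars c : Int)
      if s.1 < cnt then (cnt, some c, s.2.2 ++ [c]) else (s.1, s.2.1, s.2.2 ++ [c])) (0, none, [])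
  match r.2.1 with
  | some c => String.ofList [c]
  | none => ""

-- ===== PRECONDITION & SPEC =====
-- Pre_ excludes the inputs where Python A raises: the empty list (UnboundLocalError on b)
-- and lists containing an empty string (IndexError in x[0]); B raises there too.
def Pre_mostCommonFirstChar (L : List String) : Prop := L ≠ [] ∧ ∀ s ∈ L, s ≠ ""
instance (L : List String) : Decidable (Pre_mostCommonFirstChar L) := by
  unfold Pre_mostCommonFirstChar; infer_instance
def pvWitness_mostCommonFirstChar : List String := ["ab", "cd", "ax"]

def Spec_mostCommonFirstChar (L : List String) (out : String) : Prop := out = mostCommonFirstChar_alt L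
instance (L : List String) (out : String) : Decidable (Spec_mostCommonFirstChar L out) := by unfold Spec_mostCommonFirstChar; infer_instance

-- ===== CLAIM (what is proved, stated in full; the proofs are below) =====
def Claim_equal_mostCommonFirstChar : Prop := ∀ (L : List String), Dom_mostCommonFirstChar L → Pre_mostCommonFirstChar L → Spec_mostCommonFirstChar L (mostCommonFirstChar L)

-- ===== LEMMAS AND PROOFS =====

-- common skeleton: the best/answer scan over a key list, counting in cs
def pvScan (cs : List Char) (ks : List Char) (s : Int × Option Char) : Int × Option Char :=
  ks.foldl (fun s k => if s.1 < (cs.count k : Int) then ((cs.count k : Int), some k) else s) s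

theorem pvScan_cons (cs : List Char) (k : Char) (ks : List Char) (s : Int × Option Char) :
    pvScan cs (k :: ks) s =
      pvScan cs ks (if s.1 < (cs.count k : Int) then ((cs.count k : Int), some k) else s) := by
  simp [pvScan]

-- first occurrences of l not in seen, in order
def pvNew (seen : List Char) : List Char → List Char
  | [] => []
  | c :: l => if seen.contains c then pvNew seen l else c :: pvNew (seen ++ [c]) l

theorem pvNew_not_mem_seen (seen : List Char) (l : List Char) (k : Char)
    (hk : k ∈ pvNew seen l) : k ∉ seen := by
  induction l generalizing seen with
  | nil => simp [pvNew] at hk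
  | cons c l ih =>
    by_cases hc : c ∈ seen
    · exact ih seen (by simpa [pvNew, hc] using hk)
    · simp only [pvNew] at hk
      rw [if_neg (by simpa using hc)] at hk
      rcases List.mem_cons.mp hk with rfl | hk'
      · exact hc
      · have := ih (seen ++ [c]) hk'
        intro hmem; exact this (by simp [hmem])

theorem pvIncValue_mem (D : List (Char × Int)) (N : Char)
    (hN : N ∈ D.map Prod.fst) (hnd : (D.map Prod.fst).Nodup) :
    pvIncValue D N = D.map (fun kv => if kv.1 = N then (kv.1, kv.2 + 1) else kv) := by
  induction D with
  | nil => simp at hN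
  | cons kv rest ih =>
    obtain ⟨k, v⟩ := kv
    by_cases hk : k = N
    · subst hk
      have hrest : ∀ kv' ∈ rest, kv'.1 ≠ k := by
        intro kv' hkv' h
        simp only [List.map_cons, List.nodup_cons] at hnd
        exact hnd.1 (h ▸ List.mem_map_of_mem hkv')
      have hmap : rest.map (fun kv => if kv.1 = k then (kv.1, kv.2 + 1) else kv) = rest.map id :=
        List.map_congr_left (fun kv' h => by simp [hrest kv' h])
      simp [pvIncValue, hmap]
    · have hN' : N ∈ rest.map Prod.fst := by
        rcases List.mem_map.mp hN with ⟨kv', hkv', hfst⟩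
        rcases List.mem_cons.mp hkv' with rfl | hmem
        · exact absurd hfst hk
        · exact hfst ▸ List.mem_map_of_mem hmem
      have hnd' : (rest.map Prod.fst).Nodup := by
        simp only [List.map_cons, List.nodup_cons] at hnd; exact hnd.2
      simp [pvIncValue, hk, ih hN' hnd']

theorem pvIncValue_not_mem (D : List (Char × Int)) (N : Char)
    (hN : N ∉ D.map Prod.fst) : pvIncValue D N = D ++ [(N, 1)] := by
  induction D with
  | nil => simp [pvIncValue]
  | cons kv rest ih =>
    obtain ⟨k, v⟩ := kv
    simp only [List.map_cons, List.mem_cons, not_or] at hN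
    simp [pvIncValue, Ne.symm hN.1, ih hN.2]

-- A's dict fold, characterized: old keys get their counts added, new keys appear in
-- first-occurrence order with their counts in cs
theorem foldl_pvIncValue (cs : List Char) (D : List (Char × Int))
    (hnd : (D.map Prod.fst).Nodup) :
    cs.foldl pvIncValue D =
      D.map (fun kv => (kv.1, kv.2 + (cs.count kv.1 : Int)))
        ++ (pvNew (D.map Prod.fst) cs).map (fun k => (k, (cs.count k : Int))) := by
  induction cs generalizing D with
  | nil => simp [pvNew]
  | cons c cs ih =>
    by_cases hc : c ∈ D.map Prod.fst
    · have hkeys : (D.map (fun kv => if kv.1 = c then (kv.1, kv.2 + 1) else kv)).map Prod.fst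
          = D.map Prod.fst := by
        rw [List.map_map]
        exact List.map_congr_left (fun kv _ => by by_cases h : kv.1 = c <;> simp [h])
      rw [List.foldl_cons, pvIncValue_mem D c hc hnd,
        ih _ (by rw [hkeys]; exact hnd), hkeys,
        show pvNew (D.map Prod.fst) (c :: cs) = pvNew (D.map Prod.fst) cs from by
          simp [pvNew, hc]]
      congr 1
      · rw [List.map_map]
        refine List.map_congr_left (fun kv _ => ?_)
        by_cases h : kv.1 = c
        · simp only [Function.comp_apply, h, if_pos, List.count_cons_self, Prod.mk.injEq, true_and]
          push_cast; ring
        · simp [h, Ne.symm h]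
      · refine List.map_congr_left (fun k hk => ?_)
        have hkc : k ≠ c := fun h => (pvNew_not_mem_seen _ _ _ hk) (h ▸ hc)
        simp [Ne.symm hkc]
    · rw [List.foldl_cons, pvIncValue_not_mem D c hc,
        ih _ (by
          simp only [List.map_append, List.map_cons, List.map_nil]
          exact List.Nodup.append hnd (List.nodup_singleton c)
            (by simpa [List.disjoint_singleton] using hc)),
        show (D ++ [(c, (1 : Int))]).map Prod.fst = D.map Prod.fst ++ [c] from by simp,
        show pvNew (D.map Prod.fst) (c :: cs) = c :: pvNew (D.map Prod.fst ++ [c]) cs from by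
          simp [pvNew, hc],
        List.map_append, List.map_cons]
      rw [List.append_assoc, List.map_cons, List.map_nil, List.singleton_append]
      congr 1
      · refine List.map_congr_left (fun kv hkv => ?_)
        have hkc : kv.1 ≠ c := fun h => hc (h ▸ List.mem_map_of_mem hkv)
        simp [Ne.symm hkc]
      · congr 1
        · simp only [List.count_cons_self, Prod.mk.injEq, true_and]
          push_cast; ring
        · refine List.map_congr_left (fun k hk => ?_)
          have hkc : k ≠ c := fun h =>
            (pvNew_not_mem_seen _ _ _ hk) (by simp [h])
          simp [Ne.symm hkc]

-- A's pipeline equals the scan over the first-occurrence key list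
theorem portA_eq_scan (L : List String) :
    mostCommonFirstChar L =
      (match (pvScan (pvFirstChars L) (pvNew [] (pvFirstChars L)) (0, none)).2 with
        | some c => String.ofList [c]
        | none => "") := by
  unfold mostCommonFirstChar
  rw [pvCountFirsts, foldl_pvIncValue (pvFirstChars L) [] (by simp)]
  simp only [List.map_nil, List.nil_append]
  rw [pvScan, List.foldl_map]

-- B's fold, generalized over the seen accumulator
theorem foldl_B (cs : List Char) (rest : List Char) :
    ∀ (seen : List Char) (a : Int) (b : Option Char),
      ((rest.foldl (fun (s : Int × Option Char × List Char) (c : Char) =>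
          if s.2.2.contains c then s
          else
            let cnt : Int := (PySem.List.count cs c : Int)
            if s.1 < cnt then (cnt, some c, s.2.2 ++ [c]) else (s.1, s.2.1, s.2.2 ++ [c]))
        (a, b, seen)).1,
       (rest.foldl (fun (s : Int × Option Char × List Char) (c : Char) =>
          if s.2.2.contains c then s
          else
            let cnt : Int := (PySem.List.count cs c : Int)
            if s.1 < cnt then (cnt, some c, s.2.2 ++ [c]) else (s.1, s.2.1, s.2.2 ++ [c]))
        (a, b, seen)).2.1) = pvScan cs (pvNew seen rest) (a, b) := by
  induction rest with
  | nil => intro seen a b; simp [pvScan, pvNew]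
  | cons c rest ih =>
    intro seen a b
    by_cases hc : c ∈ seen
    · rw [show pvNew seen (c :: rest) = pvNew seen rest from by simp [pvNew, hc]]
      simp only [List.foldl_cons]
      rw [if_pos (by simpa using hc)]
      exact ih seen a b
    · rw [show pvNew seen (c :: rest) = c :: pvNew (seen ++ [c]) rest from by
          simp [pvNew, hc],
        pvScan_cons]
      simp only [List.foldl_cons, PySem.List.count]
      rw [if_neg (by simpa using hc)]
      by_cases hlt : a < (cs.count c : Int)
      · simp only [hlt, if_true]
        exact ih (seen ++ [c]) (cs.count c : Int) (some c)
      · simp only [hlt, if_false]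
        exact ih (seen ++ [c]) a b

theorem portB_eq_scan (L : List String) :
    mostCommonFirstChar_alt L =
      (match (pvScan (pvFirstChars L) (pvNew [] (pvFirstChars L)) (0, none)).2 with
        | some c => String.ofList [c]
        | none => "") := by
  unfold mostCommonFirstChar_alt
  have h := foldl_B (L.map (fun x => (PySem.Str.pyGet? x 0).getD ' '))
    (L.map (fun x => (PySem.Str.pyGet? x 0).getD ' ')) [] 0 none
  simp only [pvFirstChars]
  rw [← (congrArg Prod.snd h)]

-- ===== VERDICT (by name: the statement is the Claim_ definition above) =====
theorem mostCommonFirstChar_spec : Claim_equal_mostCommonFirstChar := by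
  intro L _ _
  unfold Spec_mostCommonFirstChar
  rw [portA_eq_scan, portB_eq_scan]
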